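-- pv_equiv track=rewrite | github.com/mujeebhussain98/CP_problems | 11-dicetoorderedhand-Python/dicetoorderedhand.py | dicetoorderedhand
-- ===== SOURCE A (Python) =====
-- def dicetoorderedhand(a, b, c):
-- 	# your code goes here
-- 	sum=0
-- 	digit_list=[]
-- 	digit_list.append(a)
-- 	digit_list.append(b)
-- 	digit_list.append(c)
-- 	mid_list = list(reversed(sorted(digit_list)))
-- 	ten_digits_list= list(reversed([10**j for j in range(len(mid_list))]))
-- 	for i in list(zip(mid_list,ten_digits_list)):
-- 		sum += i[0]*i[1]
-- 	return(sum)
-- ===== SOURCE B (Python) =====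
-- def dicetoorderedhand(a, b, c):
--     # Comparison-based selection: no lists, no sort.
--     hi = a if a >= b else b
--     hi = hi if hi >= c else c
--     lo = a if a <= b else b
--     lo = lo if lo <= c else c
--     mid = a + b + c - hi - lo
--     return hi * 100 + mid * 10 + lo
-- ===== Notes on version B (the rewrite author's own statement) =====
-- stated objective: simpler
-- what changed: Replaced build-list/sort/reverse/zip/weighted-sum with direct comparison-based selection of max and min (mid = a+b+c-hi-lo, exact integer arithmetic) and a closed-form hi*100+mid*10+lo.
import Mathlib
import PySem

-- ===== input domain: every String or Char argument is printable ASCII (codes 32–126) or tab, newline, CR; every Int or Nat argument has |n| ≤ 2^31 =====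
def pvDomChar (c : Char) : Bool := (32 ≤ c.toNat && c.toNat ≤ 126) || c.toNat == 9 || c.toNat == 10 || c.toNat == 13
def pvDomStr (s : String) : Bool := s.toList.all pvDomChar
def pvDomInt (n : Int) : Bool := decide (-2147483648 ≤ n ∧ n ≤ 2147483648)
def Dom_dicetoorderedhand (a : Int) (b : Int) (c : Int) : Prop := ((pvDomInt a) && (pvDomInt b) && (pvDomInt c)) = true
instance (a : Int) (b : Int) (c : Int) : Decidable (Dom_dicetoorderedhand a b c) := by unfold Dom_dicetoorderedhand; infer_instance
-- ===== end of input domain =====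

-- ===== PORT A =====
-- literal port of A: build [a,b,c], sort, reverse, zip with reversed powers of 10, accumulate
def dicetoorderedhand (a : Int) (b : Int) (c : Int) : Int :=
  let sum0 : Int := 0
  let digit_list : List Int := [a, b, c]
  let mid_list : List Int := (PySem.List.sorted digit_list (fun x => x) false).reverse
  let ten_digits_list : List Int :=
    ((PySem.List.pyRange 0 (mid_list.length : Int) 1).map (fun j => (10 : Int) ^ j.toNat)).reverse
  (mid_list.zip ten_digits_list).foldl (fun s i => s + i.1 * i.2) sum0

-- ===== PORT B =====
-- B: comparison-based selection, no lists or sort; mid = a+b+c-hi-lo (exact on Int)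
def dicetoorderedhand_alt (a : Int) (b : Int) (c : Int) : Int :=
  let hi1 : Int := if a ≥ b then a else b
  let hi : Int := if hi1 ≥ c then hi1 else c
  let lo1 : Int := if a ≤ b then a else b
  let lo : Int := if lo1 ≤ c then lo1 else c
  let mid : Int := a + b + c - hi - lo
  hi * 100 + mid * 10 + lo

-- ===== PRECONDITION & SPEC =====
def Spec_dicetoorderedhand (a : Int) (b : Int) (c : Int) (out : Int) : Prop := out = dicetoorderedhand_alt a b c
instance (a : Int) (b : Int) (c : Int) (out : Int) : Decidable (Spec_dicetoorderedhand a b c out) := by unfold Spec_dicetoorderedhand; infer_instance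

-- ===== CLAIM (what is proved, stated in full; the proofs are below) =====
def Claim_equal_dicetoorderedhand : Prop := ∀ (a : Int) (b : Int) (c : Int), Dom_dicetoorderedhand a b c → Spec_dicetoorderedhand a b c (dicetoorderedhand a b c)

-- ===== LEMMAS AND PROOFS =====

-- ===== VERDICT (by name: the statement is the Claim_ definition above) =====
set_option maxHeartbeats 2000000 in
theorem dicetoorderedhand_spec : Claim_equal_dicetoorderedhand := by
  intro a b c _
  unfold Spec_dicetoorderedhand dicetoorderedhand dicetoorderedhand_alt
  by_cases h1 : a < b <;> by_cases h2 : b < a <;>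
    by_cases h3 : b < c <;> by_cases h4 : c < b <;>
      by_cases h5 : a < c <;> by_cases h6 : c < a <;>
        simp [PySem.List.sorted, PySem.List.insertBy, PySem.List.pyRange,
              h1, h2, h3, h4, h5, h6, List.range_succ] <;>
          split_ifs <;> omega
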